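-- pv_equiv track=rewrite | github.com/noorrabih/Readability-interpretability | feature_extraction/parser_features.py | preprocess_conllx_text
-- ===== SOURCE A (Python) =====
-- def preprocess_conllx_text(lines):
--     """
--     Preprocesses lines to remove newlines from multiline # text entries.
--
--     Args:
--         lines (list): Lines of the .conllx file.
--
--     Returns:
--         List[str]: Preprocessed lines.
--     """
--     processed_lines = []
--     text_buffer = None  # Buffer to store multiline # text content
--
--     for line in lines:
--         if line.startswith("# text ="):
--             if text_buffer:  # Save the previous # text if it exists
--                 processed_lines.append(text_buffer.strip() + "\n")
--                 text_buffer = None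
--
--             # Start buffering this # text
--             text_buffer = line.strip()
--
--         elif text_buffer and not line.startswith("#"):  # Part of a multiline # text
--             text_buffer += " " + line.strip()
--         else:
--             if text_buffer:  # Save the buffered # text
--                 processed_lines.append(text_buffer.strip() + "\n")
--                 text_buffer = None
--             processed_lines.append(line)  # Regular line
--
--     # If there's still a buffered # text at the end
--     if text_buffer:
--         processed_lines.append(text_buffer.strip() + "\n")
--
--     return processed_lines
-- ===== SOURCE B (Python) =====
-- def preprocess_conllx_text(lines):
--     """
--     Preprocesses lines to remove newlines from multiline # text entries.
--     Index-based rewrite: each '# text =' run is consumed in one inner scan.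
--     """
--     out = []
--     i = 0
--     n = len(lines)
--     while i < n:
--         line = lines[i]
--         if line.startswith("# text ="):
--             parts = [line.strip()]
--             j = i + 1
--             while j < n and not lines[j].startswith("#"):
--                 parts.append(lines[j].strip())
--                 j += 1
--             out.append(" ".join(parts).strip() + "\n")
--             i = j
--         else:
--             out.append(line)
--             i += 1
--     return out
-- ===== Notes on version B (the rewrite author's own statement) =====
-- stated objective: alternative
-- what changed: Replaced the lazily-flushed running text_buffer state machine with an index-based loop whose inner while-loop consumes each '# text =' run (its continuation lines) at once and joins the collected parts in one step.
import Mathlib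
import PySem

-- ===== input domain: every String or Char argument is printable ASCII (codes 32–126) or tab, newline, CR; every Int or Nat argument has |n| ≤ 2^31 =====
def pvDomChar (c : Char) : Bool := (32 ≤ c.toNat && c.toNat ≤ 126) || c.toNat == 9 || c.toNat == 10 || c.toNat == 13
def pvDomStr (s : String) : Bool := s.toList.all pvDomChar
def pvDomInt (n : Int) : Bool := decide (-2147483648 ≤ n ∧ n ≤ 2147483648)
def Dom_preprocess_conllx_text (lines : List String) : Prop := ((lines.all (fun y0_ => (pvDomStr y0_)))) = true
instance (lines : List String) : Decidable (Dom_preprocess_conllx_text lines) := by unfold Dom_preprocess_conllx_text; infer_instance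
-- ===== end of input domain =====

-- B replaces A's lazily-flushed running buffer with an inner scan that consumes each '# text =' run at once; objective: alternative decomposition (same cost).

-- ===== PORT A =====
-- Python truthiness of the Optional[str] text_buffer
def pvTruthyA (buf : Option String) : Bool :=
  match buf with
  | some b => !(b == "")
  | none => false

-- 'if text_buffer: processed_lines.append(text_buffer.strip() + "\n")'
def pvFlushA (buf : Option String) : List String :=
  match buf with
  | some b => if b == "" then [] else [PySem.Str.strip b ++ "\n"]
  | none => []

def pvLoopA : List String → List String → Option String → List String
  | acc, [], buf => acc ++ pvFlushA buf
  | acc, line :: rest, buf =>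
    if PySem.Str.startswith line "# text =" then
      pvLoopA (acc ++ pvFlushA buf) rest (some (PySem.Str.strip line))
    else if pvTruthyA buf && !(PySem.Str.startswith line "#") then
      pvLoopA acc rest (some (buf.getD "" ++ " " ++ PySem.Str.strip line))
    else
      pvLoopA (acc ++ pvFlushA buf ++ [line]) rest (if pvTruthyA buf then none else buf)

def preprocess_conllx_text (lines : List String) : List String :=
  pvLoopA [] lines none

-- ===== PORT B =====
-- inner while-loop: stripped continuation parts, and the remaining lines (i = j)
def pvCollectB : List String → List String × List String
  | [] => ([], [])
  | l :: ls =>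
    if PySem.Str.startswith l "#" then ([], l :: ls)
    else
      let r := pvCollectB ls
      (PySem.Str.strip l :: r.1, r.2)

theorem pvCollectB_len (ls : List String) : (pvCollectB ls).2.length ≤ ls.length := by
  induction ls with
  | nil => simp [pvCollectB]
  | cons l ls ih =>
    simp only [pvCollectB]
    split
    · simp
    · simpa using Nat.le_succ_of_le ih

def pvLoopB : List String → List String
  | [] => []
  | line :: rest =>
    if PySem.Str.startswith line "# text =" then
      (PySem.Str.strip (PySem.Str.join " " (PySem.Str.strip line :: (pvCollectB rest).1)) ++ "\n")
        :: pvLoopB (pvCollectB rest).2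
    else
      line :: pvLoopB rest
termination_by ls => ls.length
decreasing_by
  · exact Nat.lt_succ_of_le (pvCollectB_len rest)
  · simp

def preprocess_conllx_text_alt (lines : List String) : List String :=
  pvLoopB lines

-- ===== PRECONDITION & SPEC =====
def Spec_preprocess_conllx_text (lines : List String) (out : List String) : Prop := out = preprocess_conllx_text_alt lines
instance (lines : List String) (out : List String) : Decidable (Spec_preprocess_conllx_text lines out) := by unfold Spec_preprocess_conllx_text; infer_instance

-- ===== CLAIM (what is proved, stated in full; the proofs are below) =====
def Claim_equal_preprocess_conllx_text : Prop := ∀ (lines : List String), Dom_preprocess_conllx_text lines → Spec_preprocess_conllx_text lines (preprocess_conllx_text lines)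

-- ===== LEMMAS AND PROOFS =====

-- step lemmas for A's loop
theorem pvLoopA_text (acc : List String) (line : String) (rest : List String) (buf : Option String)
    (ht : PySem.Str.startswith line "# text =" = true) :
    pvLoopA acc (line :: rest) buf = pvLoopA (acc ++ pvFlushA buf) rest (some (PySem.Str.strip line)) := by
  simp at ht
  simp [pvLoopA, ht]

theorem pvLoopA_cont (acc : List String) (line : String) (rest : List String) (b : String)
    (hb : (b == "") = false) (ht : PySem.Str.startswith line "# text =" = false)
    (hh : PySem.Str.startswith line "#" = false) :
    pvLoopA acc (line :: rest) (some b) = pvLoopA acc rest (some (b ++ " " ++ PySem.Str.strip line)) := by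
  simp at ht hh
  simp [pvLoopA, pvTruthyA, ht, hh, hb]

theorem pvLoopA_hash (acc : List String) (line : String) (rest : List String) (b : String)
    (hb : (b == "") = false) (ht : PySem.Str.startswith line "# text =" = false)
    (hh : PySem.Str.startswith line "#" = true) :
    pvLoopA acc (line :: rest) (some b)
      = pvLoopA (acc ++ [PySem.Str.strip b ++ "\n"] ++ [line]) rest none := by
  simp at ht hh
  simp [pvLoopA, pvTruthyA, pvFlushA, ht, hh, hb]

theorem pvLoopA_none (acc : List String) (line : String) (rest : List String)
    (ht : PySem.Str.startswith line "# text =" = false) :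
    pvLoopA acc (line :: rest) none = pvLoopA (acc ++ [line]) rest none := by
  simp at ht
  simp [pvLoopA, pvTruthyA, pvFlushA, ht]

-- step lemmas for B
theorem pvCollectB_hash (l : String) (ls : List String)
    (hh : PySem.Str.startswith l "#" = true) : pvCollectB (l :: ls) = ([], l :: ls) := by
  simp only [pvCollectB, hh, if_true]

theorem pvCollectB_cont (l : String) (ls : List String)
    (hh : PySem.Str.startswith l "#" = false) :
    pvCollectB (l :: ls) = (PySem.Str.strip l :: (pvCollectB ls).1, (pvCollectB ls).2) := by
  simp only [pvCollectB, hh, Bool.false_eq_true, if_false]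

theorem pvLoopB_text (line : String) (rest : List String)
    (ht : PySem.Str.startswith line "# text =" = true) :
    pvLoopB (line :: rest)
      = (PySem.Str.strip (PySem.Str.join " " (PySem.Str.strip line :: (pvCollectB rest).1)) ++ "\n")
          :: pvLoopB (pvCollectB rest).2 := by
  rw [pvLoopB]
  simp only [ht, if_true]

theorem pvLoopB_other (line : String) (rest : List String)
    (ht : PySem.Str.startswith line "# text =" = false) :
    pvLoopB (line :: rest) = line :: pvLoopB rest := by
  rw [pvLoopB]
  simp only [ht, Bool.false_eq_true, if_false]

-- '# text =' lines start with '#'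
theorem pvStartsHash (l : String) (h : PySem.Str.startswith l "# text =" = true) :
    PySem.Str.startswith l "#" = true := by
  simp only [PySem.Str.startswith] at h ⊢
  rw [PySem.Chars.startswith_iff] at h ⊢
  exact List.IsPrefix.trans (by decide) h

-- stripping a line that starts with '#' cannot give the empty string
theorem pvStripNe (l : String) (h : PySem.Str.startswith l "#" = true) :
    PySem.Str.strip l ≠ "" := by
  simp only [PySem.Str.startswith] at h
  rw [PySem.Chars.startswith_iff] at h
  obtain ⟨t, ht⟩ := h
  intro hc
  have h1 : (PySem.Str.strip l).toList = ([] : List Char) := by rw [hc]; simp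
  rw [PySem.Str.toList_strip, ← ht] at h1
  have hth : "#".toList = ['#'] := by decide
  rw [hth] at h1
  have hsp : PySem.Chars.isspace '#' = false := by decide
  simp only [PySem.Chars.strip, PySem.Chars.lstrip, PySem.Chars.rstrip, List.cons_append,
    List.nil_append] at h1
  rw [List.dropWhile_cons_of_neg (by simp [hsp])] at h1
  have h2 : List.dropWhile PySem.Chars.isspace ('#' :: t).reverse = [] := by
    have := congrArg List.reverse h1
    simpa using this
  have h3 := List.dropWhile_eq_nil_iff.mp h2 '#' (by simp)
  simp [hsp] at h3

-- appending to a nonempty string keeps it nonempty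
theorem pvAppendNe (b s : String) (hb : b ≠ "") : b ++ s ≠ "" := by
  intro hc
  have := congrArg String.toList hc
  simp at this
  exact hb this.1

-- ' '.join(p :: ps) as a left fold
theorem pvJoinFoldl (ps : List String) (p : String) :
    PySem.Str.join " " (p :: ps) = ps.foldl (fun a q => a ++ " " ++ q) p := by
  induction ps generalizing p with
  | nil =>
    simp only [List.foldl]
    apply String.toList_injective
    rw [PySem.Str.toList_join]
    simp [PySem.Chars.join_singleton]
  | cons q rest ih =>
    simp only [List.foldl]
    rw [← ih (p ++ " " ++ q)]
    apply String.toList_injective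
    rw [PySem.Str.toList_join, PySem.Str.toList_join]
    simp only [List.map_cons, PySem.Chars.join_cons_cons]
    cases rest with
    | nil => simp [PySem.Chars.join_singleton]
    | cons r rs => simp [PySem.Chars.join_cons_cons]

-- the buffered state machine equals the run-based loop, for both buffer states
theorem pvMain (ls : List String) :
    (∀ acc, pvLoopA acc ls none = acc ++ pvLoopB ls) ∧
    (∀ acc b, (b == "") = false → pvLoopA acc ls (some b) =
      acc ++ (PySem.Str.strip ((pvCollectB ls).1.foldl (fun a q => a ++ " " ++ q) b) ++ "\n")
          :: pvLoopB (pvCollectB ls).2) := by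
  induction ls with
  | nil =>
    constructor
    · intro acc; simp [pvLoopA, pvFlushA, pvLoopB]
    · intro acc b hb
      simp [pvLoopA, pvFlushA, pvCollectB, pvLoopB, hb]
  | cons line rest ih =>
    constructor
    · intro acc
      cases ht : PySem.Str.startswith line "# text =" with
      | true =>
        have hh := pvStartsHash line ht
        have hne : (PySem.Str.strip line == "") = false := by
          simpa using pvStripNe line hh
        rw [pvLoopA_text acc line rest none ht, pvLoopB_text line rest ht]
        simp only [pvFlushA, List.append_nil]
        rw [ih.2 acc (PySem.Str.strip line) hne, pvJoinFoldl]
      | false =>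
        rw [pvLoopA_none acc line rest ht, pvLoopB_other line rest ht, ih.1 (acc ++ [line])]
        simp
    · intro acc b hb
      cases ht : PySem.Str.startswith line "# text =" with
      | true =>
        have hh := pvStartsHash line ht
        have hne : (PySem.Str.strip line == "") = false := by
          simpa using pvStripNe line hh
        rw [pvLoopA_text acc line rest (some b) ht,
          pvCollectB_hash line rest hh, pvLoopB_text line rest ht]
        simp only [pvFlushA, hb, Bool.false_eq_true, if_false]
        rw [ih.2 (acc ++ [PySem.Str.strip b ++ "\n"]) (PySem.Str.strip line) hne, pvJoinFoldl]
        simp [List.foldl]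
      | false =>
        cases hh : PySem.Str.startswith line "#" with
        | true =>
          rw [pvLoopA_hash acc line rest b hb ht hh, pvCollectB_hash line rest hh,
            pvLoopB_other line rest ht, ih.1 (acc ++ [PySem.Str.strip b ++ "\n"] ++ [line])]
          simp [List.foldl]
        | false =>
          have hb1 : b ≠ "" := by simp at hb; exact hb
          have hbe : (b ++ " " ++ PySem.Str.strip line == "") = false := by
            simpa using pvAppendNe (b ++ " ") (PySem.Str.strip line) (pvAppendNe b " " hb1)
          rw [pvLoopA_cont acc line rest b hb ht hh, pvCollectB_cont line rest hh,
            ih.2 acc (b ++ " " ++ PySem.Str.strip line) hbe]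
          simp [List.foldl]

-- ===== VERDICT (by name: the statement is the Claim_ definition above) =====
theorem preprocess_conllx_text_spec : Claim_equal_preprocess_conllx_text := by
  intro lines _
  unfold Spec_preprocess_conllx_text preprocess_conllx_text preprocess_conllx_text_alt
  simpa using (pvMain lines).1 []
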